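-- pv_equiv track=rewrite | github.com/zerocola355ml/timetable | scheduler.py | _check_conflicts_with_existing_subjects
-- ===== SOURCE A (Python) =====
-- from typing import Dict, List, Any, Tuple, Optional
--
-- def _check_conflicts_with_existing_subjects(
--                                           new_subject: str,
--                                           existing_subjects: List[str],
--                                           student_conflict_dict: Dict[str, List[str]] = None,
--                                           listening_conflict_dict: Dict[str, List[str]] = None,
--                                           teacher_conflict_dict: Dict[str, List[str]] = None) -> bool:
--     """
--     새 과목이 기존 과목들과 충돌하지 않는지 확인합니다.
--     충돌이 있으면 False, 없으면 True를 반환합니다.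
--     """
--     for existing_subject in existing_subjects:
--         # 학생 충돌 확인
--         if student_conflict_dict:
--             if (new_subject in student_conflict_dict and existing_subject in student_conflict_dict[new_subject]) or \
--                (existing_subject in student_conflict_dict and new_subject in student_conflict_dict[existing_subject]):
--                 return False
--
--         # 듣기평가 충돌 확인
--         if listening_conflict_dict:
--             if (new_subject in listening_conflict_dict and existing_subject in listening_conflict_dict[new_subject]) or \
--                (existing_subject in listening_conflict_dict and new_subject in listening_conflict_dict[existing_subject]):
--                 return False
--
--         # 교사 충돌 확인
--         if teacher_conflict_dict:
--             if (new_subject in teacher_conflict_dict and existing_subject in teacher_conflict_dict[new_subject]) or \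
--                (existing_subject in teacher_conflict_dict and new_subject in teacher_conflict_dict[existing_subject]):
--                 return False
--
--     return True
-- ===== SOURCE B (Python) =====
-- from typing import Dict, List
--
-- def _check_conflicts_with_existing_subjects(
--                                           new_subject: str,
--                                           existing_subjects: List[str],
--                                           student_conflict_dict: Dict[str, List[str]] = None,
--                                           listening_conflict_dict: Dict[str, List[str]] = None,
--                                           teacher_conflict_dict: Dict[str, List[str]] = None) -> bool:
--     # Build one set of every subject that conflicts with new_subject
--     # (forward neighbours and reverse edges of each non-falsy dict),
--     # then a single membership pass over the existing subjects.
--     conflict_set = set()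
--     for d in (student_conflict_dict, listening_conflict_dict, teacher_conflict_dict):
--         if d:
--             if new_subject in d:
--                 conflict_set.update(d[new_subject])
--             conflict_set.update(k for k in d if new_subject in d[k])
--     return not any(e in conflict_set for e in existing_subjects)
-- ===== Notes on version B (the rewrite author's own statement) =====
-- stated objective: alternative
-- what changed: B precomputes a single conflict_set (forward neighbours of new_subject plus reverse edges scanned once per dict) and then does one membership pass over existing_subjects, replacing A's per-existing-subject nest of six dict probes.
import Mathlib
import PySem

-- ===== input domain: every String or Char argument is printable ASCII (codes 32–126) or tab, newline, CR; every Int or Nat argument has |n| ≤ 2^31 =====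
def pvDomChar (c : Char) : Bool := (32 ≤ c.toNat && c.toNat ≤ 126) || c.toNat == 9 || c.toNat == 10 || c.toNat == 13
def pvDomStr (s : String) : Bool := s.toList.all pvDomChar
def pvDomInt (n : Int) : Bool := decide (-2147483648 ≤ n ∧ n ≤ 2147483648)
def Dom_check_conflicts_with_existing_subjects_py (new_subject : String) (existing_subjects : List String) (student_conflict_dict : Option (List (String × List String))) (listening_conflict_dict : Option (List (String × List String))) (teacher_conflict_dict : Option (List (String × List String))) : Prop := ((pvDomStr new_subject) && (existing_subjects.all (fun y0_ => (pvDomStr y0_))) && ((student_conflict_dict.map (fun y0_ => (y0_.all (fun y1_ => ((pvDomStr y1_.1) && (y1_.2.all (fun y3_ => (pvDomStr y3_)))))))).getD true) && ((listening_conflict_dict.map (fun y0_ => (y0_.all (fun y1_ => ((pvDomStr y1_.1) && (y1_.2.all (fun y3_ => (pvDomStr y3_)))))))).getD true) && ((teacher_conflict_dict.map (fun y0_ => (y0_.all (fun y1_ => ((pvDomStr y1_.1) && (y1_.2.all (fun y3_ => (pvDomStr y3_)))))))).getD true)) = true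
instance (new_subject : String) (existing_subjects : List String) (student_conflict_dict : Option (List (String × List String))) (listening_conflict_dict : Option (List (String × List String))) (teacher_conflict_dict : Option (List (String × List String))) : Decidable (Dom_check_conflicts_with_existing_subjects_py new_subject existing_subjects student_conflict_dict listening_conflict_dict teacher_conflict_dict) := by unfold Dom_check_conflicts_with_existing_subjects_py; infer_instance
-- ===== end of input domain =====

-- B builds one conflict set (forward neighbours + reverse edges of each non-falsy dict) once, then a single membership pass over existing_subjects, instead of A's per-subject branch nest; return values proved equal.

-- ===== PORT A =====
-- One dict's test in A's branch: 'if d:' (falsy = None or empty) then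
-- '(ns in d and e in d[ns]) or (e in d and ns in d[e])'; dict lookup is
-- first-match on the association list (List.lookup), per the type convention.
def ccwDictHit (ns e : String) (d : Option (List (String × List String))) : Bool :=
  match d with
  | none => false
  | some l =>
    if l.isEmpty then false
    else
      ((match l.lookup ns with | some v => decide (e ∈ v) | none => false) ||
       (match l.lookup e with | some v => decide (ns ∈ v) | none => false))

-- A's loop over existing_subjects with its three early-return branches in order.
def ccwLoop (ns : String) (s li t : Option (List (String × List String))) : List String → Bool
  | [] => true
  | e :: rest =>
    if ccwDictHit ns e s then false
    else if ccwDictHit ns e li then false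
    else if ccwDictHit ns e t then false
    else ccwLoop ns s li t rest

def check_conflicts_with_existing_subjects_py (new_subject : String) (existing_subjects : List String) (student_conflict_dict : Option (List (String × List String))) (listening_conflict_dict : Option (List (String × List String))) (teacher_conflict_dict : Option (List (String × List String))) : Bool :=
  ccwLoop new_subject student_conflict_dict listening_conflict_dict teacher_conflict_dict existing_subjects

-- ===== PORT B =====
-- B's per-dict step: if d is truthy, add new_subject's forward neighbours
-- (if new_subject is a key) and then the reverse-edge keys to the conflict set.
def ccwAddDict (ns : String) (cs : PySem.Set String) (d : Option (List (String × List String))) : PySem.Set String :=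
  match d with
  | none => cs
  | some l =>
    if l.isEmpty then cs
    else
      let cs1 := match l.lookup ns with
        | some v => PySem.Set.update cs v
        | none => cs
      PySem.Set.update cs1 ((l.map Prod.fst).filter (fun k => decide (ns ∈ (l.lookup k).getD [])))

def check_conflicts_with_existing_subjects_py_alt (new_subject : String) (existing_subjects : List String) (student_conflict_dict : Option (List (String × List String))) (listening_conflict_dict : Option (List (String × List String))) (teacher_conflict_dict : Option (List (String × List String))) : Bool :=
  let cs := ccwAddDict new_subject
    (ccwAddDict new_subject
      (ccwAddDict new_subject PySem.Set.empty student_conflict_dict)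
      listening_conflict_dict)
    teacher_conflict_dict
  ! existing_subjects.any (fun e => PySem.Set.contains cs e)

-- ===== PRECONDITION & SPEC =====
def Spec_check_conflicts_with_existing_subjects_py (new_subject : String) (existing_subjects : List String) (student_conflict_dict : Option (List (String × List String))) (listening_conflict_dict : Option (List (String × List String))) (teacher_conflict_dict : Option (List (String × List String))) (out : Bool) : Prop := out = check_conflicts_with_existing_subjects_py_alt new_subject existing_subjects student_conflict_dict listening_conflict_dict teacher_conflict_dict
instance (new_subject : String) (existing_subjects : List String) (student_conflict_dict : Option (List (String × List String))) (listening_conflict_dict : Option (List (String × List String))) (teacher_conflict_dict : Option (List (String × List String))) (out : Bool) : Decidable (Spec_check_conflicts_with_existing_subjects_py new_subject existing_subjects student_conflict_dict listening_conflict_dict teacher_conflict_dict out) := by unfold Spec_check_conflicts_with_existing_subjects_py; infer_instance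

-- ===== CLAIM (what is proved, stated in full; the proofs are below) =====
def Claim_equal_check_conflicts_with_existing_subjects_py : Prop := ∀ (new_subject : String) (existing_subjects : List String) (student_conflict_dict : Option (List (String × List String))) (listening_conflict_dict : Option (List (String × List String))) (teacher_conflict_dict : Option (List (String × List String))), Dom_check_conflicts_with_existing_subjects_py new_subject existing_subjects student_conflict_dict listening_conflict_dict teacher_conflict_dict → Spec_check_conflicts_with_existing_subjects_py new_subject existing_subjects student_conflict_dict listening_conflict_dict teacher_conflict_dict (check_conflicts_with_existing_subjects_py new_subject existing_subjects student_conflict_dict listening_conflict_dict teacher_conflict_dict)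

-- ===== LEMMAS AND PROOFS =====
-- first-match lookup succeeds exactly on the keys
theorem ccw_lookup_isSome (l : List (String × List String)) (e : String) :
    (l.lookup e).isSome ↔ e ∈ l.map Prod.fst := by
  induction l with
  | nil => simp [List.lookup]
  | cons h t ih =>
    rcases h with ⟨k, v⟩
    by_cases hk : k = e
    · subst hk; simp [List.lookup]
    · have hbe : (e == k) = false := beq_false_of_ne (Ne.symm hk)
      simp only [List.lookup, hbe, List.map_cons, List.mem_cons]
      rw [ih]
      simp [Ne.symm hk]

-- membership in B's set after one dict's additions = old membership or A's test for that dict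
theorem ccw_mem_addDict (ns e : String) (cs : PySem.Set String)
    (d : Option (List (String × List String))) :
    e ∈ ccwAddDict ns cs d ↔ e ∈ cs ∨ ccwDictHit ns e d = true := by
  match d with
  | none => simp [ccwAddDict, ccwDictHit]
  | some l =>
    simp only [ccwAddDict, ccwDictHit]
    by_cases hl : l.isEmpty
    · simp [hl]
    · simp only [hl, Bool.false_eq_true, if_false]
      rw [PySem.Set.mem_update]
      simp only [Bool.or_eq_true]
      constructor
      · rintro (h | h)
        · cases hns : l.lookup ns with
          | none => simp [hns] at h ⊢; tauto
          | some v =>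
            rw [hns] at h
            rw [PySem.Set.mem_update] at h
            rcases h with h | h
            · exact Or.inl h
            · right; left; simp [h]
        · right; right
          rcases List.mem_filter.mp h with ⟨hmem, hpred⟩
          have hs : (l.lookup e).isSome := (ccw_lookup_isSome l e).mpr hmem
          cases he : l.lookup e with
          | none => rw [he] at hs; simp at hs
          | some v => simp [he] at hpred; exact decide_eq_true hpred
      · rintro (h | h | h)
        · left
          cases hns : l.lookup ns
          · exact h
          · rw [PySem.Set.mem_update]; exact Or.inl h
        · cases hns : l.lookup ns with
          | none => simp [hns] at h
          | some v =>
            rw [hns] at h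
            left; rw [PySem.Set.mem_update]
            right; exact of_decide_eq_true h
        · right
          cases he : l.lookup e with
          | none => simp [he] at h
          | some v =>
            rw [he] at h
            refine List.mem_filter.mpr ⟨(ccw_lookup_isSome l e).mp (by simp [he]), ?_⟩
            simp [he]
            exact of_decide_eq_true h

-- A's loop is the negated any of the per-element disjunction
theorem ccw_loop_eq_any (ns : String) (s li t : Option (List (String × List String)))
    (es : List String) :
    ccwLoop ns s li t es =
      ! es.any (fun e => ccwDictHit ns e s || ccwDictHit ns e li || ccwDictHit ns e t) := by
  induction es with
  | nil => simp [ccwLoop]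
  | cons e rest ih =>
    simp only [ccwLoop, List.any_cons, Bool.not_or]
    by_cases h1 : ccwDictHit ns e s = true
    · simp [h1]
    · by_cases h2 : ccwDictHit ns e li = true
      · simp [h1, h2]
      · by_cases h3 : ccwDictHit ns e t = true
        · simp [h1, h2, h3]
        · simp [h1, h2, h3, ih]


-- ===== VERDICT (by name: the statement is the Claim_ definition above) =====
theorem check_conflicts_with_existing_subjects_py_spec : Claim_equal_check_conflicts_with_existing_subjects_py := by
  intro ns es s li t _
  unfold Spec_check_conflicts_with_existing_subjects_py
  unfold check_conflicts_with_existing_subjects_py check_conflicts_with_existing_subjects_py_alt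
  rw [ccw_loop_eq_any]
  have h : ∀ e : String,
      PySem.Set.contains
        (ccwAddDict ns (ccwAddDict ns (ccwAddDict ns PySem.Set.empty s) li) t) e
      = (ccwDictHit ns e s || ccwDictHit ns e li || ccwDictHit ns e t) := by
    intro e
    apply Bool.eq_iff_iff.mpr
    rw [PySem.Set.contains_iff, ccw_mem_addDict, ccw_mem_addDict, ccw_mem_addDict]
    simp [PySem.Set.empty, or_assoc]
  simp only [h]
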